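-- pv_equiv track=rewrite | github.com/gdavge2003/TSP_algorithm_implementation | nearest_insertion_heuristic/DFS_MST/DFS_MST.py | kruskal_alg
-- ===== SOURCE A (Python) =====
-- class edge:
-- 	u = None # 1st vertex
-- 	v = None # 2nd vertex
-- 	d = 0 # distance from 1st vertext to 2nd vertex
-- 	def __init__(self, u, v, d):
-- 		self.u = u
-- 		self.v = v
-- 		self.d = d
--
-- def kruskal_alg(adj_mtrx):
-- 	edges = []
-- 	for i in range(0, len(adj_mtrx) - 1):
-- 		for j in range(i + 1, len(adj_mtrx)):
-- 			e = edge(i, j, adj_mtrx[i][j])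
-- 			edges.append(e)
-- 	edges.sort(key = lambda x: x.d)
--
-- 	previous = [None for x in range(len(adj_mtrx))]
-- 	visited = []
-- 	for e in edges:
-- #		print (str(e.d) + "," + str(e.u) + "," + str(e.v))
-- 		if (not(e.v in visited)):
-- 			visited.append(e.v)
-- #			print (visited)
-- 			previous[e.v] = e.u
-- #			print (previous)
-- 	return previous
-- ===== SOURCE B (Python) =====
-- def kruskal_alg(adj_mtrx):
--     n = len(adj_mtrx)
--     previous = []
--     for j in range(n):
--         best = None  # (index, distance) of current argmin over i < j
--         for i in range(j):
--             d = adj_mtrx[i][j]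
--             if best is None or d < best[1]:
--                 best = (i, d)
--         previous.append(None if best is None else best[0])
--     return previous
-- ===== Notes on version B (the rewrite author's own statement) =====
-- stated objective: faster
-- what changed: A materialises all n(n-1)/2 upper-triangle edges, stable-sorts them by distance and takes the first edge hitting each vertex; B drops the edge list and the sort entirely and, for each column j, does one direct scan over i < j keeping the first strict minimum (exactly what sort-stability plus first-hit yields).
import Mathlib
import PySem

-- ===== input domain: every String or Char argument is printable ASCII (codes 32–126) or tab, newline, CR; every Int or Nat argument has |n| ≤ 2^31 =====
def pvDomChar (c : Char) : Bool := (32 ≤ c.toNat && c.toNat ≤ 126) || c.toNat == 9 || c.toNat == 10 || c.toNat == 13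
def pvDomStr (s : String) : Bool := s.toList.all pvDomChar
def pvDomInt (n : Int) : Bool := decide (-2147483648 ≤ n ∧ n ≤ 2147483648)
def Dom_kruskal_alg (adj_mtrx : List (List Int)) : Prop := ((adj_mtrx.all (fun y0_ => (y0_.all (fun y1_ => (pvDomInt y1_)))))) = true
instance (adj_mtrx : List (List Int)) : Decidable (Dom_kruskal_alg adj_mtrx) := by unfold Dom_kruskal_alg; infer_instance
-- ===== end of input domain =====

-- B replaces A's build-all-edges + stable sort + first-hit pass by a direct O(n^2)
-- per-column argmin scan (objective: faster, asymptotically — no O(n^2)-element sort).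

-- ===== PORT A =====
-- Literal port of A. Python's range(a,b) over nonnegative bounds is List.range / List.range';
-- adj_mtrx[i][j] is ported with getD (the accessed indices are in range exactly on Pre_ below,
-- where Python returns; outside Pre_ Python raises IndexError). previous[e.v] = e.u is List.set
-- (e.v < len(previous) always holds). The sort is Python's stable sort by key, PySem.List.sorted.
def kruskal_alg (adj_mtrx : List (List Int)) : List (Option Int) :=
  let n := adj_mtrx.length
  let edges : List (Nat × Nat × Int) :=
    (List.range (n - 1)).foldl (fun acc i =>
      (List.range' (i + 1) (n - (i + 1))).foldl
        (fun acc2 j => acc2 ++ [(i, j, (adj_mtrx.getD i []).getD j 0)]) acc) []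
  let sortedEdges := PySem.List.sorted edges (fun e => e.2.2)
  let final := sortedEdges.foldl
    (fun (st : List (Option Int) × List Nat) e =>
      if st.2.contains e.2.1 then st
      else (st.1.set e.2.1 (some (e.1 : Int)), st.2 ++ [e.2.1]))
    ((List.range n).map (fun _ => (none : Option Int)), ([] : List Nat))
  final.1

-- ===== PORT B =====
-- Literal port of Source B: for each column j, one scan over i < j keeping (index, distance)
-- of the strictly smallest distance seen so far (first minimum wins).
def kruskal_alg_alt (adj_mtrx : List (List Int)) : List (Option Int) :=
  let n := adj_mtrx.length
  (List.range n).map (fun j =>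
    let best := (List.range j).foldl
      (fun b i =>
        let dij := (adj_mtrx.getD i []).getD j 0
        match b with
        | none => some (i, dij)
        | some (bi, bd) => if dij < bd then some (i, dij) else some (bi, bd))
      (none : Option (Nat × Int))
    best.map (fun q => (q.1 : Int)))

-- ===== PRECONDITION & SPEC =====
-- Pre_ excludes exactly the ragged matrices on which Python A raises IndexError: A reads
-- adj_mtrx[i][j] for every i < n-1 and i < j ≤ n-1, so it returns iff each of the first
-- n-1 rows has length ≥ n.
def Pre_kruskal_alg (adj_mtrx : List (List Int)) : Prop :=
  ∀ row ∈ adj_mtrx.dropLast, adj_mtrx.length ≤ row.length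
instance (adj_mtrx : List (List Int)) : Decidable (Pre_kruskal_alg adj_mtrx) := by
  unfold Pre_kruskal_alg; infer_instance
def pvWitness_kruskal_alg : List (List Int) := [[0, 1], [1, 0]]

def Spec_kruskal_alg (adj_mtrx : List (List Int)) (out : List (Option Int)) : Prop := out = kruskal_alg_alt adj_mtrx
instance (adj_mtrx : List (List Int)) (out : List (Option Int)) : Decidable (Spec_kruskal_alg adj_mtrx out) := by unfold Spec_kruskal_alg; infer_instance

-- ===== CLAIM (what is proved, stated in full; the proofs are below) =====
def Claim_equal_kruskal_alg : Prop := ∀ (adj_mtrx : List (List Int)), Dom_kruskal_alg adj_mtrx → Pre_kruskal_alg adj_mtrx → Spec_kruskal_alg adj_mtrx (kruskal_alg adj_mtrx)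

-- ===== LEMMAS AND PROOFS =====

-- proof-only helper: one step of a first-minimum scan (strict <, earlier element wins ties)
def minStep {α : Type} (key : α → Int) (b : Option α) (x : α) : Option α :=
  match b with
  | none => some x
  | some m => if key x < key m then some x else some m

-- Stability of Python's sort, in the only form we need: inserting x into a key-sorted S,
-- the first element satisfying p is obtained from S's first match by one min-step
-- (strict <, existing match wins ties).
theorem find?_insertBy {α : Type} (key : α → Int) (p : α → Bool) (x : α) (S : List α)
    (hS : S.Pairwise (fun a b => key a ≤ key b)) :
    (PySem.List.insertBy (fun a b => decide (key a < key b)) x S).find? p =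
      (if p x then minStep key (S.find? p) x else S.find? p) := by
  induction S with
  | nil =>
    simp only [PySem.List.insertBy, List.find?]
    cases hp : p x <;> simp [minStep, hp]
  | cons y ys ih =>
    have hys : ys.Pairwise (fun a b => key a ≤ key b) := hS.tail
    have hhead : ∀ b ∈ ys, key y ≤ key b := fun b hb => List.rel_of_pairwise_cons hS hb
    by_cases hxy : key x < key y
    · simp only [PySem.List.insertBy, hxy, decide_true, if_true]
      cases hp : p x
      · rw [List.find?_cons_of_neg (by simp [hp])]
        simp
      · rw [List.find?_cons_of_pos (by simp [hp])]
        simp only [hp, if_true]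
        cases hm : List.find? p (y :: ys) with
        | none => simp [minStep]
        | some m =>
          have hmem := List.mem_of_find?_eq_some hm
          have : key y ≤ key m := by
            rcases List.mem_cons.mp hmem with h | h
            · exact h ▸ le_refl _
            · exact hhead m h
          have hxm : key x < key m := lt_of_lt_of_le hxy this
          simp [minStep, hxm]
    · simp only [PySem.List.insertBy, hxy, decide_false]
      rw [if_neg (by simp)]
      cases hpy : p y
      · rw [List.find?_cons_of_neg (by simp [hpy]), List.find?_cons_of_neg (by simp [hpy]),
          ih hys]
      · rw [List.find?_cons_of_pos (by simp [hpy]), List.find?_cons_of_pos (by simp [hpy])]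
        cases hp : p x
        · simp
        · have hnxy : ¬ key x < key y := hxy
          simp [minStep, hp, hnxy]

-- The first match in sorted(xs, key) is computed by a single left-to-right min-scan of xs.
theorem find?_sorted {α : Type} (key : α → Int) (p : α → Bool) (xs : List α) :
    (PySem.List.sorted xs key).find? p =
      xs.foldl (fun b x => if p x then minStep key b x else b) none := by
  induction xs using List.reverseRecOn with
  | nil => simp [PySem.List.sorted]
  | append_singleton xs x ih =>
    rw [PySem.List.sorted_eq_foldl_insertBy, List.foldl_append, List.foldl_cons, List.foldl_nil,
      ← PySem.List.sorted_eq_foldl_insertBy, List.foldl_append, List.foldl_cons, List.foldl_nil,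
      find?_insertBy key p x _ (PySem.List.sorted_pairwise xs key), ih]

-- A guarded fold only sees the elements satisfying the guard.
theorem foldl_guard_filter {α β : Type} (p : α → Bool) (g : β → α → β) :
    ∀ (l : List α) (b : β),
      l.foldl (fun b x => if p x then g b x else b) b = (l.filter p).foldl g b := by
  intro l
  induction l with
  | nil => intro b; rfl
  | cons x t ih =>
    intro b
    by_cases hp : p x <;> simp [hp, ih]

-- flatMap of guarded singletons is map-over-filter.
theorem flatMap_if_singleton {α β : Type} (q : α → Prop) [DecidablePred q] (g : α → β) :
    ∀ l : List α, (l.flatMap (fun i => if q i then [g i] else [])) = (l.filter (fun i => decide (q i))).map g := by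
  intro l
  induction l with
  | nil => rfl
  | cons x t ih => by_cases hq : q x <;> simp [hq, ih]

theorem range_filter_lt (v : Nat) : ∀ m : Nat, (List.range m).filter (fun i => decide (i < v)) = List.range (min v m) := by
  intro m
  induction m with
  | zero => simp
  | succ m ih =>
    rw [List.range_succ, List.filter_append, ih]
    by_cases h : m < v
    · have h1 : min v m = m := by omega
      have h2 : min v (m + 1) = m + 1 := by omega
      simp [h, h1, List.range_succ]
    · have h1 : min v m = v := by omega
      have h2 : min v (m + 1) = v := by omega
      simp [h, h1, h2]

-- The edge list A builds, in closed form.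
theorem edges_closed (f : Nat → Nat → Int) (n : Nat) :
    (List.range (n - 1)).foldl (fun acc i =>
      (List.range' (i + 1) (n - (i + 1))).foldl
        (fun acc2 j => acc2 ++ [((i, j, f i j) : Nat × Nat × Int)]) acc) []
    = (List.range (n - 1)).flatMap
        (fun i => (List.range' (i + 1) (n - (i + 1))).map (fun j => (i, j, f i j))) := by
  have h : (fun (acc : List (Nat × Nat × Int)) i =>
      (List.range' (i + 1) (n - (i + 1))).foldl
        (fun acc2 j => acc2 ++ [((i, j, f i j) : Nat × Nat × Int)]) acc)
      = fun acc i => acc ++ (List.range' (i + 1) (n - (i + 1))).map (fun j => (i, j, f i j)) := by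
    funext acc i
    exact PySem.List.foldl_append_singleton_eq_map _ _ _
  rw [h, PySem.List.foldl_append_eq_flatMap]
  rfl

-- Column v of the edge list: exactly the edges (i, v, f i v), i < v, in increasing i.
theorem edges_filter_col (f : Nat → Nat → Int) (n v : Nat) (hv : v < n) :
    ((List.range (n - 1)).flatMap
        (fun i => (List.range' (i + 1) (n - (i + 1))).map (fun j => ((i, j, f i j) : Nat × Nat × Int)))).filter
      (fun e => e.2.1 == v)
    = (List.range v).map (fun i => (i, v, f i v)) := by
  rw [List.filter_flatMap]
  have hblock : ∀ i ∈ List.range (n - 1),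
      ((List.range' (i + 1) (n - (i + 1))).map (fun j => ((i, j, f i j) : Nat × Nat × Int))).filter
        (fun e => e.2.1 == v)
      = if i < v then [((i, v, f i v) : Nat × Nat × Int)] else [] := by
    intro i hi
    have hin : i < n - 1 := List.mem_range.mp hi
    rw [List.filter_map]
    have hpf : ((fun (e : Nat × Nat × Int) => e.2.1 == v) ∘ (fun j => ((i, j, f i j) : Nat × Nat × Int)))
        = fun j => j == v := rfl
    rw [hpf, List.filter_beq]
    by_cases hiv : i < v
    · have hmem : v ∈ List.range' (i + 1) (n - (i + 1)) := by
        rw [List.mem_range'_1]; omega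
      rw [List.count_eq_one_of_mem List.nodup_range' hmem]
      simp [hiv]
    · have hmem : v ∉ List.range' (i + 1) (n - (i + 1)) := by
        rw [List.mem_range'_1]; omega
      rw [List.count_eq_zero_of_not_mem hmem]
      simp [hiv]
  calc (List.range (n - 1)).flatMap (fun i =>
          ((List.range' (i + 1) (n - (i + 1))).map (fun j => ((i, j, f i j) : Nat × Nat × Int))).filter
            (fun e => e.2.1 == v))
      = (List.range (n - 1)).flatMap (fun i => if i < v then [((i, v, f i v) : Nat × Nat × Int)] else []) :=
        List.flatMap_congr hblock
    _ = ((List.range (n - 1)).filter (fun i => decide (i < v))).map (fun i => (i, v, f i v)) :=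
        flatMap_if_singleton _ _ _
    _ = (List.range v).map (fun i => (i, v, f i v)) := by
        rw [range_filter_lt]
        have : min v (n - 1) = v := by omega
        rw [this]

-- A's first-hit fold, entrywise: entry v is set by the first edge of the list whose
-- second vertex is v (and left as initialised if there is none).
theorem loopA (S : List (Nat × Nat × Int)) :
    ∀ (prev : List (Option Int)) (vis : List Nat) (v : Nat), v < prev.length →
      ((S.foldl (fun (st : List (Option Int) × List Nat) e =>
          if st.2.contains e.2.1 then st
          else (st.1.set e.2.1 (some (e.1 : Int)), st.2 ++ [e.2.1])) (prev, vis)).1)[v]?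
      = if vis.contains v then prev[v]?
        else match S.find? (fun e => e.2.1 == v) with
          | some e => some (some (e.1 : Int))
          | none => prev[v]? := by
  induction S with
  | nil => intro prev vis v hv; cases h : vis.contains v <;> simp [h]
  | cons e S ih =>
    intro prev vis v hv
    rw [List.foldl_cons]
    by_cases hc : vis.contains e.2.1
    · simp only [hc, if_true]
      rw [ih prev vis v hv]
      by_cases hev : e.2.1 = v
      · have hcv : vis.contains v = true := hev ▸ hc
        rw [hcv]
        simp
      · rw [List.find?_cons_of_neg (by simp [hev])]
    · simp only [hc, Bool.false_eq_true, if_false]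
      rw [ih (prev.set e.2.1 (some (e.1 : Int))) (vis ++ [e.2.1]) v (by simpa using hv)]
      by_cases hev : e.2.1 = v
      · have hvisv : vis.contains v = false := by rw [← hev]; simpa using hc
        have hcontains : (vis ++ [e.2.1]).contains v = true := by
          rw [List.contains_append]; simp [hev]
        rw [hcontains, if_pos rfl, hvisv, if_neg (by simp)]
        rw [List.find?_cons_of_pos (by simp [hev])]
        rw [hev, List.getElem?_set_self (hev ▸ hv)]
      · have hcontains : (vis ++ [e.2.1]).contains v = vis.contains v := by
          rw [List.contains_append]
          simp only [List.contains_cons, List.contains_nil, Bool.or_false]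
          have hne : (v == e.2.1) = false := by simp; exact fun h => absurd h.symm hev
          rw [hne, Bool.or_false]
        rw [hcontains, List.getElem?_set_ne (by omega : e.2.1 ≠ v),
          List.find?_cons_of_neg (by simp [hev])]

-- A's fold never changes the length of `previous`.
theorem loopA_len (S : List (Nat × Nat × Int)) :
    ∀ (prev : List (Option Int)) (vis : List Nat),
      ((S.foldl (fun (st : List (Option Int) × List Nat) e =>
          if st.2.contains e.2.1 then st
          else (st.1.set e.2.1 (some (e.1 : Int)), st.2 ++ [e.2.1])) (prev, vis)).1).length
      = prev.length := by
  induction S with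
  | nil => intro prev vis; rfl
  | cons e S ih =>
    intro prev vis
    rw [List.foldl_cons]
    by_cases hc : vis.contains e.2.1
    · simp only [hc, if_true]; exact ih prev vis
    · simp only [hc, Bool.false_eq_true, if_false]
      rw [ih]; simp

-- A's min-scan over column v computes (the index part of) B's scan.
theorem scan_rel (adj : List (List Int)) (v : Nat) :
    ∀ (l : List Nat) (bA : Option (Nat × Nat × Int)) (bB : Option (Nat × Int)),
      bA.map (fun e => (e.1, e.2.2)) = bB →
      (((l.map (fun i => ((i, v, (adj.getD i []).getD v 0) : Nat × Nat × Int))).foldl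
          (fun b x => minStep (fun e => e.2.2) b x) bA).map (fun e => (e.1, e.2.2)))
      = l.foldl (fun b i =>
          match b with
          | none => some (i, (adj.getD i []).getD v 0)
          | some (bi, bd) => if (adj.getD i []).getD v 0 < bd then some (i, (adj.getD i []).getD v 0) else some (bi, bd)) bB := by
  intro l
  induction l with
  | nil => intro bA bB hrel; simpa using hrel
  | cons i t ih =>
    intro bA bB hrel
    rw [List.map_cons, List.foldl_cons, List.foldl_cons]
    cases bA with
    | none =>
      cases hrel
      simp only [minStep]
      exact ih _ _ rfl
    | some m =>
      cases hrel
      simp only [minStep, Option.map_some]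
      by_cases hlt : (adj.getD i []).getD v 0 < m.2.2
      · simp only [hlt, if_true]
        exact ih _ _ rfl
      · simp only [hlt, if_false]
        exact ih _ _ rfl

-- an Option-valued match as a map
theorem match_as_map (o : Option (Nat × Nat × Int)) :
    (match o with
      | some e => some (some (e.1 : Int))
      | none => some (none : Option Int))
    = some (o.map (fun e => (e.1 : Int))) := by
  cases o <;> rfl

theorem map_fst_of_rel (o : Option (Nat × Nat × Int)) :
    o.map (fun e => (e.1 : Int)) = (o.map (fun e => (e.1, e.2.2))).map (fun q => (q.1 : Int)) := by
  cases o <;> rfl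

-- The main equivalence, entry by entry.
theorem kruskal_eq (adj : List (List Int)) : kruskal_alg adj = kruskal_alg_alt adj := by
  have hlen1 : (kruskal_alg adj).length = adj.length := by
    simp only [kruskal_alg]
    rw [loopA_len]
    simp
  have hlen2 : (kruskal_alg_alt adj).length = adj.length := by
    simp [kruskal_alg_alt]
  apply List.ext_getElem?
  intro v
  by_cases hv : v < adj.length
  · simp only [kruskal_alg, kruskal_alg_alt]
    rw [edges_closed (fun i j => (adj.getD i []).getD j 0) adj.length]
    rw [loopA _ _ _ v (by simpa using hv)]
    rw [if_neg (by simp)]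
    have hinit : (List.map (fun _ => (none : Option Int)) (List.range adj.length))[v]? = some none := by
      simp [hv]
    rw [hinit, match_as_map]
    rw [find?_sorted (α := Nat × Nat × Int) (fun e => e.2.2) (fun e => e.2.1 == v)]
    rw [foldl_guard_filter]
    rw [edges_filter_col (fun i j => (adj.getD i []).getD j 0) adj.length v hv]
    rw [map_fst_of_rel]
    rw [scan_rel adj v (List.range v) none none rfl]
    rw [List.getElem?_map]
    simp [hv]
  · rw [List.getElem?_eq_none (by omega : (kruskal_alg adj).length ≤ v),
      List.getElem?_eq_none (by omega : (kruskal_alg_alt adj).length ≤ v)]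

-- ===== VERDICT (by name: the statement is the Claim_ definition above) =====
theorem kruskal_alg_spec : Claim_equal_kruskal_alg := by
  intro adj _ _
  unfold Spec_kruskal_alg
  exact kruskal_eq adj
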